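-- pv_equiv track=rewrite | github.com/leilei9011/CMU-15-112-Fundamentals-of-Programming | hw3.py | patternedMessage
-- ===== SOURCE A (Python) =====
-- import string
--
-- def patternedMessage(msg, pattern):
--     newMsg = ''
--     msgIndex = 0
--     pattern = pattern.strip() #remove leading and trailing new nums
--     for i in pattern:
--         if i in string.whitespace:
--             newMsg += i
--         else:
--             while msg[msgIndex] in string.whitespace: #removes spaces in msg
--                 msgIndex = (msgIndex+1)%len(msg)
--             newMsg += msg[msgIndex]
--             msgIndex = (msgIndex+1)%len(msg)
--     return newMsg
-- ===== SOURCE B (Python) =====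
-- import string
--
-- def patternedMessage(msg, pattern):
--     chars = [c for c in msg if c not in string.whitespace]
--     out = []
--     k = 0
--     for ch in pattern.strip():
--         if ch in string.whitespace:
--             out.append(ch)
--         else:
--             out.append(chars[k % len(chars)])
--             k += 1
--     return ''.join(out)
-- ===== Notes on version B (the rewrite author's own statement) =====
-- stated objective: simpler
-- what changed: B filters the non-whitespace characters of msg once up front and cycles through that list with a counter modulo its length, instead of A's inner while-loop that skips whitespace in msg with a wrapping index on every non-whitespace pattern character; output is collected in a list and joined instead of repeated string concatenation.
import Mathlib
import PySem

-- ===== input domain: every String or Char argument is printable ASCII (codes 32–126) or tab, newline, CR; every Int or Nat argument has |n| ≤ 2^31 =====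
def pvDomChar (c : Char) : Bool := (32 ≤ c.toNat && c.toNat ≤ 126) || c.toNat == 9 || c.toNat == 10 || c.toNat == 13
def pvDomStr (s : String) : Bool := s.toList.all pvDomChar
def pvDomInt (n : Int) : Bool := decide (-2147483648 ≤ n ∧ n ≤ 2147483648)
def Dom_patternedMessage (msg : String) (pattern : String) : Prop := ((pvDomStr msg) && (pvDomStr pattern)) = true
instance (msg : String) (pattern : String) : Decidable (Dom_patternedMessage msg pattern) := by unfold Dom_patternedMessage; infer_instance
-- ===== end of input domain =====

-- B replaces A's per-character inner whitespace-skipping scan over msg (wrapping index) with a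
-- one-time filter of msg's non-whitespace characters cycled by a counter, collecting the output
-- in a list joined at the end (objective: simpler).

-- ===== PORT A =====

-- 'c in string.whitespace' (string.whitespace = ' \t\n\x0b\x0c\r'); exact on any input
def pmIsWs (c : Char) : Bool :=
  c == ' ' || c == '\t' || c == '\n' || c == '\x0b' || c == '\x0c' || c == '\r'

-- the inner 'while msg[msgIndex] in string.whitespace' loop, fuel-bounded; fuel = len(msg)
-- suffices whenever msg has a non-whitespace character (the inputs Pre_ admits); the Python
-- while loop raises IndexError (empty msg) or diverges (all-whitespace msg) exactly outside Pre_.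
def pmSkip (msg : List Char) (i : Nat) : Nat → Nat
  | 0 => i
  | fuel+1 => if pmIsWs (msg.getD i ' ') then pmSkip msg ((i+1) % msg.length) fuel else i

def pmLoopA (msg : List Char) : List Char → String → Nat → String
  | [], newMsg, _ => newMsg
  | c :: rest, newMsg, msgIndex =>
    if pmIsWs c then pmLoopA msg rest (newMsg.push c) msgIndex
    else
      let j := pmSkip msg msgIndex msg.length
      pmLoopA msg rest (newMsg.push (msg.getD j ' ')) ((j+1) % msg.length)

def patternedMessage (msg : String) (pattern : String) : String :=
  pmLoopA msg.toList (PySem.Str.strip pattern).toList "" 0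

-- ===== PORT B =====

def pmLoopB (chars : List Char) : List Char → List Char → Nat → List Char
  | [], out, _ => out
  | c :: rest, out, k =>
    if pmIsWs c then pmLoopB chars rest (out ++ [c]) k
    else pmLoopB chars rest (out ++ [chars.getD (k % chars.length) ' ']) (k+1)

def patternedMessage_alt (msg : String) (pattern : String) : String :=
  let chars := msg.toList.filter (fun c => !pmIsWs c)
  String.ofList (pmLoopB chars (PySem.Str.strip pattern).toList [] 0)

-- ===== PRECONDITION & SPEC =====
-- Pre_ excludes exactly the inputs on which A does not return normally: when msg has no
-- non-whitespace character while the stripped pattern still has a non-whitespace slot, A's inner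
-- while loop raises IndexError (empty msg) or diverges (all-whitespace msg); B raises
-- ZeroDivisionError on those inputs.
def Pre_patternedMessage (msg : String) (pattern : String) : Prop :=
  msg.toList.any (fun c => !pmIsWs c) = true ∨
  (PySem.Str.strip pattern).toList.all pmIsWs = true
instance (msg : String) (pattern : String) : Decidable (Pre_patternedMessage msg pattern) := by
  unfold Pre_patternedMessage; infer_instance

def pvWitness_patternedMessage : String × String := ("hi there", "** **\n ***")

def Spec_patternedMessage (msg : String) (pattern : String) (out : String) : Prop := out = patternedMessage_alt msg pattern
instance (msg : String) (pattern : String) (out : String) : Decidable (Spec_patternedMessage msg pattern out) := by unfold Spec_patternedMessage; infer_instance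

-- ===== CLAIM (what is proved, stated in full; the proofs are below) =====
def Claim_equal_patternedMessage : Prop := ∀ (msg : String) (pattern : String), Dom_patternedMessage msg pattern → Pre_patternedMessage msg pattern → Spec_patternedMessage msg pattern (patternedMessage msg pattern)

-- ===== LEMMAS AND PROOFS =====

-- count of non-whitespace characters strictly before index j
def pmCnt (L : List Char) (j : Nat) : Nat := (L.take j).countP (fun c => !pmIsWs c)

theorem pmCnt_succ (L : List Char) (j : Nat) (h : j < L.length) :
    pmCnt L (j+1) = pmCnt L j + (if pmIsWs (L.getD j ' ') then 0 else 1) := by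
  unfold pmCnt
  rw [List.take_add_one, List.getElem?_eq_getElem h]
  rw [List.getD_eq_getElem?_getD, List.getElem?_eq_getElem h]
  simp only [List.countP_append, Option.getD_some]
  by_cases hw : pmIsWs L[j] = true <;> simp [hw]

theorem pmCnt_length (L : List Char) :
    pmCnt L L.length = (L.filter (fun c => !pmIsWs c)).length := by
  simp [pmCnt, List.countP_eq_length_filter]

-- the j-th char of L, when non-whitespace, is element pmCnt L j of the filtered list
theorem pmFilter_get (L : List Char) (j : Nat) (hj : j < L.length)
    (hw : pmIsWs (L.getD j ' ') = false) :
    pmCnt L j < (L.filter (fun c => !pmIsWs c)).length ∧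
    (L.filter (fun c => !pmIsWs c)).getD (pmCnt L j) ' ' = L.getD j ' ' := by
  induction L generalizing j with
  | nil => simp at hj
  | cons a t ih =>
    cases j with
    | zero =>
      simp only [List.getD_cons_zero] at hw ⊢
      simp [pmCnt, hw]
    | succ j =>
      simp only [List.getD_cons_succ] at hw ⊢
      have hj' : j < t.length := by simpa using hj
      have h := ih j hj' hw
      have hc : pmCnt (a :: t) (j+1) = pmCnt t j + (if pmIsWs a then 0 else 1) := by
        cases hwa : pmIsWs a <;> simp [pmCnt, hwa]
      cases hwa : pmIsWs a
      · have hfil : List.filter (fun c => !pmIsWs c) (a::t) = a :: List.filter (fun c => !pmIsWs c) t := by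
          simp [hwa]
        have hcnt : pmCnt (a::t) (j+1) = pmCnt t j + 1 := by rw [hc, hwa]; simp
        rw [hfil, hcnt, List.getD_cons_succ]
        exact ⟨by simp; omega, h.2⟩
      · have hfil : List.filter (fun c => !pmIsWs c) (a::t) = List.filter (fun c => !pmIsWs c) t := by
          simp [hwa]
        have hcnt : pmCnt (a::t) (j+1) = pmCnt t j := by rw [hc, hwa]; simp
        rw [hfil, hcnt]
        exact h

-- pmSkip finds a non-whitespace position (given one exists within fuel cyclic steps) and
-- preserves pmCnt modulo the filtered length
theorem pmSkip_spec (L : List Char) (F : Nat)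
    (hF : F = (L.filter (fun c => !pmIsWs c)).length) :
    ∀ (fuel i : Nat), i < L.length →
    (∃ d, d < fuel ∧ pmIsWs (L.getD ((i+d) % L.length) ' ') = false) →
    pmSkip L i fuel < L.length ∧
    pmIsWs (L.getD (pmSkip L i fuel) ' ') = false ∧
    pmCnt L (pmSkip L i fuel) % F = pmCnt L i % F := by
  intro fuel
  induction fuel with
  | zero => intro i _ h; obtain ⟨d, hd, _⟩ := h; omega
  | succ fuel ih =>
    intro i hi h
    by_cases hwi : pmIsWs (L.getD i ' ') = true
    · have hn : 0 < L.length := by omega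
      have hstep : pmSkip L i (fuel+1) = pmSkip L ((i+1) % L.length) fuel := by
        rw [pmSkip, if_pos hwi]
      obtain ⟨d, hd, hdw⟩ := h
      have hd0 : d ≠ 0 := by
        intro h0
        rw [h0, Nat.add_zero, Nat.mod_eq_of_lt hi] at hdw
        rw [hwi] at hdw
        exact absurd hdw (by simp)
      obtain ⟨d', rfl⟩ : ∃ d', d = d' + 1 := ⟨d - 1, by omega⟩
      have hshift : ((i+1) % L.length + d') % L.length = (i + (d'+1)) % L.length := by
        rw [Nat.mod_add_mod]
        ring_nf
      have h' : ∃ e, e < fuel ∧ pmIsWs (L.getD (((i+1) % L.length + e) % L.length) ' ') = false :=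
        ⟨d', by omega, by rw [hshift]; exact hdw⟩
      have hi' : (i+1) % L.length < L.length := Nat.mod_lt _ hn
      have hrec := ih ((i+1) % L.length) hi' h'
      refine ⟨by rw [hstep]; exact hrec.1, by rw [hstep]; exact hrec.2.1, ?_⟩
      rw [hstep, hrec.2.2]
      by_cases hlast : i + 1 = L.length
      · -- wraps to 0: L[i] is whitespace and is the last char, so pmCnt L i = F
        have hcnt : pmCnt L (i+1) = pmCnt L i := by
          rw [pmCnt_succ L i hi, hwi]; simp
        have hcF : pmCnt L i = F := by
          rw [← hcnt, hlast, pmCnt_length, hF]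
        have hz : (i+1) % L.length = 0 := by rw [hlast, Nat.mod_self]
        rw [hz]
        show pmCnt L 0 % F = pmCnt L i % F
        rw [hcF, Nat.mod_self]
        simp [pmCnt]
      · have hlt : (i+1) % L.length = i+1 := Nat.mod_eq_of_lt (by omega)
        rw [hlt, pmCnt_succ L i hi, hwi]
        simp
    · simp only [Bool.not_eq_true] at hwi
      have hstep : pmSkip L i (fuel+1) = i := by
        rw [pmSkip, if_neg (by rw [hwi]; exact Bool.false_ne_true)]
      rw [hstep]
      exact ⟨hi, hwi, rfl⟩

-- an all-whitespace pattern: both loops copy it verbatim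
theorem pmLoop_ws (L f : List Char) :
    ∀ (pat : List Char), pat.all pmIsWs = true →
    ∀ (out : List Char) (i k : Nat),
    pmLoopA L pat (String.ofList out) i = String.ofList (pmLoopB f pat out k) := by
  intro pat
  induction pat with
  | nil => intro _ out i k; rfl
  | cons c rest ih =>
    intro hall out i k
    simp only [List.all_cons, Bool.and_eq_true] at hall
    have hpush : (String.ofList out).push c = String.ofList (out ++ [c]) := by
      apply String.ext; simp
    simp only [pmLoopA, pmLoopB, hall.1, if_pos, hpush]
    exact ih hall.2 (out ++ [c]) i k

-- main loop invariant: A's msg index i and B's counter k agree as pmCnt L i ≡ k (mod filtered length)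
theorem pmLoop_eq (L : List Char) (hany : L.any (fun c => !pmIsWs c) = true) :
    ∀ (pat out : List Char) (i k : Nat), i < L.length →
    pmCnt L i % (L.filter (fun c => !pmIsWs c)).length = k % (L.filter (fun c => !pmIsWs c)).length →
    pmLoopA L pat (String.ofList out) i =
      String.ofList (pmLoopB (L.filter (fun c => !pmIsWs c)) pat out k) := by
  have hn : 0 < L.length := by
    cases L with
    | nil => simp at hany
    | cons a t => simp
  intro pat
  induction pat with
  | nil => intro out i k _ _; rfl
  | cons c rest ih =>
    intro out i k hi hinv
    by_cases hwc : pmIsWs c = true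
    · have hpush : (String.ofList out).push c = String.ofList (out ++ [c]) := by
        apply String.ext; simp
      simp only [pmLoopA, pmLoopB, hwc, if_pos, hpush]
      exact ih (out ++ [c]) i k hi hinv
    · simp only [Bool.not_eq_true] at hwc
      obtain ⟨m, hmlen, hmw⟩ : ∃ m, m < L.length ∧ pmIsWs (L.getD m ' ') = false := by
        simp only [List.any_eq_true] at hany
        obtain ⟨x, hx, hp⟩ := hany
        obtain ⟨m, hm, rfl⟩ := List.mem_iff_getElem.mp hx
        refine ⟨m, hm, ?_⟩
        rw [List.getD_eq_getElem?_getD, List.getElem?_eq_getElem hm]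
        simpa using hp
      have hwit : ∃ d, d < L.length ∧ pmIsWs (L.getD ((i+d) % L.length) ' ') = false := by
        refine ⟨(m + (L.length - i)) % L.length, Nat.mod_lt _ hn, ?_⟩
        have heq : (i + (m + (L.length - i)) % L.length) % L.length = m := by
          rw [Nat.add_mod, Nat.mod_mod_of_dvd, ← Nat.add_mod]
          · have h2 : i + (m + (L.length - i)) = m + L.length := by omega
            rw [h2, Nat.add_mod_right, Nat.mod_eq_of_lt hmlen]
          · exact dvd_refl _
        rw [heq]; exact hmw
      have hskip := pmSkip_spec L _ rfl L.length i hi hwit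
      set j := pmSkip L i L.length with hj
      have hjlt : j < L.length := hskip.1
      have hjw : pmIsWs (L.getD j ' ') = false := hskip.2.1
      have hjcnt := hskip.2.2
      have hget := pmFilter_get L j hjlt hjw
      have hcntj : pmCnt L j < (L.filter (fun c => !pmIsWs c)).length := hget.1
      have hchar : L.getD j ' ' =
          (L.filter (fun c => !pmIsWs c)).getD (k % (L.filter (fun c => !pmIsWs c)).length) ' ' := by
        rw [← hget.2]
        congr 1
        rw [← Nat.mod_eq_of_lt hcntj, hjcnt, hinv]
      have hpush : (String.ofList out).push (L.getD j ' ') =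
          String.ofList (out ++ [(L.filter (fun c => !pmIsWs c)).getD (k % (L.filter (fun c => !pmIsWs c)).length) ' ']) := by
        rw [hchar]; apply String.ext; simp
      simp only [pmLoopA, pmLoopB, hwc, Bool.false_eq_true, if_false, ← hj, hpush]
      apply ih
      · exact Nat.mod_lt _ hn
      · have hstep : pmCnt L (j+1) = pmCnt L j + 1 := by
          rw [pmCnt_succ L j hjlt, hjw]
          simp
        by_cases hlast : j + 1 = L.length
        · rw [hlast, Nat.mod_self]
          have hcF : pmCnt L j + 1 = (L.filter (fun c => !pmIsWs c)).length := by
            rw [← hstep, hlast, pmCnt_length]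
          have hkF : k % (L.filter (fun c => !pmIsWs c)).length = (L.filter (fun c => !pmIsWs c)).length - 1 := by
            rw [← hinv, ← hjcnt, Nat.mod_eq_of_lt hcntj]; omega
          have h2 : (k + 1) % (L.filter (fun c => !pmIsWs c)).length = (k % (L.filter (fun c => !pmIsWs c)).length + 1) % (L.filter (fun c => !pmIsWs c)).length := by
            rw [Nat.mod_add_mod]
          rw [h2, hkF]
          have h3 : (L.filter (fun c => !pmIsWs c)).length - 1 + 1 = (L.filter (fun c => !pmIsWs c)).length := by omega
          rw [h3, Nat.mod_self]
          simp [pmCnt]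
        · rw [Nat.mod_eq_of_lt (show j+1 < L.length by omega), hstep]
          have h1 : (pmCnt L j + 1) % (L.filter (fun c => !pmIsWs c)).length = (pmCnt L j % (L.filter (fun c => !pmIsWs c)).length + 1) % (L.filter (fun c => !pmIsWs c)).length := by
            rw [Nat.mod_add_mod]
          have h2 : (k + 1) % (L.filter (fun c => !pmIsWs c)).length = (k % (L.filter (fun c => !pmIsWs c)).length + 1) % (L.filter (fun c => !pmIsWs c)).length := by
            rw [Nat.mod_add_mod]
          rw [h1, h2, hjcnt, hinv]

-- ===== VERDICT (by name: the statement is the Claim_ definition above) =====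
theorem patternedMessage_spec : Claim_equal_patternedMessage := by
  intro msg pattern _ hpre
  unfold Spec_patternedMessage patternedMessage patternedMessage_alt
  cases hpre with
  | inl hany =>
    have h0 : ("" : String) = String.ofList [] := rfl
    rw [h0]
    apply pmLoop_eq msg.toList hany
    · cases hL : msg.toList with
      | nil => rw [hL] at hany; simp at hany
      | cons a t => simp
    · simp [pmCnt]
  | inr hall =>
    have h0 : ("" : String) = String.ofList [] := rfl
    rw [h0]
    exact pmLoop_ws msg.toList _ _ hall [] 0 0
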